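-- pv_equiv track=rewrite | github.com/Emagip/LesCercleuu | Jeu_en_tk_v2/codage_jeu.py | decoder_jeu
-- ===== SOURCE A (Python) =====
-- def decoder_jeu(jeu_encode,n):
--     """Permet de décoder un jeu encodé pour retrouver la position de chaque côte"""
--
--     resu = ''
--     while jeu_encode != 0:
--         resu=str(jeu_encode%4+2)+resu
--         jeu_encode//=4
--
--     while len(resu)<n:
--         resu = '2'+resu
--     return [int(x) for x in resu]
-- ===== SOURCE B (Python) =====
-- def decoder_jeu(jeu_encode, n):
--     """Permet de décoder un jeu encodé pour retrouver la position de chaque côte"""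
--     # Recursive base-4 conversion: the base case [2]*n produces the left padding
--     # (and [] when n has already gone non-positive).
--     if jeu_encode == 0:
--         return [2] * n
--     return decoder_jeu(jeu_encode // 4, n - 1) + [jeu_encode % 4 + 2]
-- ===== Notes on version B (the rewrite author's own statement) =====
-- stated objective: simpler
-- what changed: Replaces the two while-loops building a decimal string (then re-parsing each character with int) by a direct base-4 structural recursion returning the integer digit list, with [2]*n as the base case doing the padding in one step.
import Mathlib
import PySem

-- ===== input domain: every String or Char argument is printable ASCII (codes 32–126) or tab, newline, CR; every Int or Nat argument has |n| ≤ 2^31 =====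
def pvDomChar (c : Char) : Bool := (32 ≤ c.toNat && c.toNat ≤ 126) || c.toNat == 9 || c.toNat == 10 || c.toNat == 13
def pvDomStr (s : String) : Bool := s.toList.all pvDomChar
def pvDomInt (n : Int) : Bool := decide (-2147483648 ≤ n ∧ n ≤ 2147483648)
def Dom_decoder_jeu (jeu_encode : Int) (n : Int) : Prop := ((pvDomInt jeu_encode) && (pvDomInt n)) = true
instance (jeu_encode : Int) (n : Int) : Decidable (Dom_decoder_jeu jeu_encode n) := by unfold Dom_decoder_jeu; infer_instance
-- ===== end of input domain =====

-- B replaces A's two string-building while-loops by a direct base-4 structural recursion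
-- returning the integer digit list (objective: simpler). Both programs fail to return for
-- negative jeu_encode (A loops forever, B hits the recursion limit); Pre_ excludes that.


-- ===== PORT A =====
-- first while-loop: resu (as List Char) accumulates str(jeu_encode%4+2)+resu
def pvLoopA (e : Int) (resu : List Char) : List Char :=
  if e = 0 then resu
  else if e < 0 then resu  -- totality guard only: Python loops forever here (excluded by Pre_)
  else pvLoopA (PySem.Int.floordiv e 4) (PySem.Int.toChars (PySem.Int.mod e 4 + 2) ++ resu)
termination_by e.toNat
decreasing_by
  have h4 : PySem.Int.floordiv e 4 = e / 4 := PySem.Int.floordiv_eq_ediv_of_pos (by omega)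
  rw [h4]; omega

-- second while-loop: while len(resu) < n: resu = '2' + resu
def pvPadA (resu : List Char) (n : Int) : List Char :=
  if (resu.length : Int) < n then pvPadA ('2' :: resu) n else resu
termination_by (n - resu.length).toNat
decreasing_by simp; omega

-- int(x) for a single digit character x (exact on digit chars; resu holds only '2'..'5')
def pvIntOf (c : Char) : Int := (c.toNat : Int) - 48

def decoder_jeu (jeu_encode : Int) (n : Int) : List Int :=
  (pvPadA (pvLoopA jeu_encode []) n).map pvIntOf

-- ===== PORT B =====
def decoder_jeu_alt (jeu_encode : Int) (n : Int) : List Int :=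
  if jeu_encode = 0 then List.replicate n.toNat 2   -- [2]*n ([] for n ≤ 0, as in Python)
  else if jeu_encode < 0 then []  -- totality guard only: Python exceeds the recursion limit here (excluded by Pre_)
  else decoder_jeu_alt (PySem.Int.floordiv jeu_encode 4) (n - 1) ++ [PySem.Int.mod jeu_encode 4 + 2]
termination_by jeu_encode.toNat
decreasing_by
  have h4 : PySem.Int.floordiv jeu_encode 4 = jeu_encode / 4 := PySem.Int.floordiv_eq_ediv_of_pos (by omega)
  rw [h4]; omega

-- ===== PRECONDITION & SPEC =====
-- Negative jeu_encode is excluded: there A's while-loop never terminates (jeu_encode//=4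
-- stalls at -1) and B's recursion never reaches its base case either; neither returns.
def Pre_decoder_jeu (jeu_encode : Int) (n : Int) : Prop := 0 ≤ jeu_encode
instance (jeu_encode : Int) (n : Int) : Decidable (Pre_decoder_jeu jeu_encode n) := by unfold Pre_decoder_jeu; infer_instance
def pvWitness_decoder_jeu : Int × Int := (77, 6)

def Spec_decoder_jeu (jeu_encode : Int) (n : Int) (out : List Int) : Prop := out = decoder_jeu_alt jeu_encode n
instance (jeu_encode : Int) (n : Int) (out : List Int) : Decidable (Spec_decoder_jeu jeu_encode n out) := by unfold Spec_decoder_jeu; infer_instance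

-- ===== CLAIM (what is proved, stated in full; the proofs are below) =====
def Claim_equal_decoder_jeu : Prop := ∀ (jeu_encode : Int) (n : Int), Dom_decoder_jeu jeu_encode n → Pre_decoder_jeu jeu_encode n → Spec_decoder_jeu jeu_encode n (decoder_jeu jeu_encode n)

-- ===== LEMMAS AND PROOFS =====

-- A's padding loop prepends exactly (n - len).toNat copies of '2'
theorem pvPadA_eq (resu : List Char) (n : Int) :
    pvPadA resu n = List.replicate (n - resu.length).toNat '2' ++ resu := by
  by_cases h : (resu.length : Int) < n
  · rw [pvPadA]
    simp only [h, if_pos]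
    rw [pvPadA_eq ('2' :: resu) n]
    have hk : (n - resu.length).toNat = (n - ('2' :: resu).length).toNat + 1 := by
      simp; omega
    rw [hk, List.replicate_succ']
    simp
  · rw [pvPadA]
    simp only [h, if_neg, not_false_iff]
    have : (n - (resu.length : Int)).toNat = 0 := by omega
    simp [this]
termination_by (n - resu.length).toNat
decreasing_by simp; omega

-- B padded by extra n equals replicate-pad of B's unpadded digit list
theorem alt_pad (e : Int) (he : 0 ≤ e) (n : Int) :
    decoder_jeu_alt e n =
      List.replicate (n - (decoder_jeu_alt e 0).length).toNat 2 ++ decoder_jeu_alt e 0 := by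
  by_cases h0 : e = 0
  · subst h0
    simp [decoder_jeu_alt]
  · have hpos : 0 < e := by omega
    have h4 : PySem.Int.floordiv e 4 = e / 4 := PySem.Int.floordiv_eq_ediv_of_pos (by omega)
    have hge : 0 ≤ e / 4 := by omega
    rw [decoder_jeu_alt]
    simp only [h0, if_false, if_neg (by omega : ¬ e < 0)]
    have ih := alt_pad (PySem.Int.floordiv e 4) (by rw [h4]; exact hge)
    rw [ih (n - 1)]
    -- compute the unpadded form of decoder_jeu_alt e 0
    conv_rhs => rw [decoder_jeu_alt]
    simp only [h0, if_false, if_neg (by omega : ¬ e < 0)]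
    rw [ih (0 - 1)]
    have hlen : ((0 : Int) - 1 - (decoder_jeu_alt (PySem.Int.floordiv e 4) 0).length).toNat = 0 := by
      omega
    rw [hlen]
    simp only [List.replicate_zero, List.nil_append]
    have : (n - ((decoder_jeu_alt (PySem.Int.floordiv e 4) 0 ++ [PySem.Int.mod e 4 + 2]).length : Int)).toNat
        = (n - 1 - ((decoder_jeu_alt (PySem.Int.floordiv e 4) 0).length : Int)).toNat := by
      simp; omega
    rw [this, List.append_assoc]
termination_by e.toNat
decreasing_by rw [h4]; omega

-- the single-digit string str(e%4+2) maps back to [e%4+2]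
theorem digit_chars (e : Int) (hpos : 0 < e) :
    (PySem.Int.toChars (PySem.Int.mod e 4 + 2)).map pvIntOf = [PySem.Int.mod e 4 + 2] := by
  have h0 : 0 ≤ PySem.Int.mod e 4 := PySem.Int.mod_nonneg e (by omega)
  have h1 : PySem.Int.mod e 4 < 4 := PySem.Int.mod_lt e (by omega)
  interval_cases h : PySem.Int.mod e 4 <;> decide

-- A's digit loop produces B's unpadded digit list (mapped through int)
theorem loopA_eq (e : Int) (he : 0 ≤ e) (acc : List Char) :
    (pvLoopA e acc).map pvIntOf = decoder_jeu_alt e 0 ++ acc.map pvIntOf := by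
  by_cases h0 : e = 0
  · subst h0; rw [pvLoopA, decoder_jeu_alt]; simp
  · have hpos : 0 < e := by omega
    have h4 : PySem.Int.floordiv e 4 = e / 4 := PySem.Int.floordiv_eq_ediv_of_pos (by omega)
    rw [pvLoopA]
    simp only [h0, if_false, if_neg (by omega : ¬ e < 0)]
    rw [loopA_eq (PySem.Int.floordiv e 4) (by rw [h4]; omega)]
    -- unfold decoder_jeu_alt e 0 once
    conv_rhs => rw [decoder_jeu_alt]
    simp only [h0, if_false, if_neg (by omega : ¬ e < 0)]
    rw [alt_pad (PySem.Int.floordiv e 4) (by rw [h4]; omega) (0 - 1)]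
    have hlen : ((0 : Int) - 1 - (decoder_jeu_alt (PySem.Int.floordiv e 4) 0).length).toNat = 0 := by
      omega
    rw [hlen]
    simp only [List.replicate_zero, List.nil_append, List.map_append, digit_chars e hpos,
      List.append_assoc]
termination_by e.toNat
decreasing_by rw [h4]; omega

-- ===== VERDICT (by name: the statement is the Claim_ definition above) =====
theorem decoder_jeu_spec : Claim_equal_decoder_jeu := by
  intro e n _ hpre
  unfold Spec_decoder_jeu decoder_jeu
  rw [pvPadA_eq, List.map_append, loopA_eq e hpre []]
  simp only [List.map_nil, List.append_nil, List.map_replicate]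
  have h2 : pvIntOf '2' = 2 := by decide
  rw [h2]
  have hlen : ((pvLoopA e []).length : Int) = ((decoder_jeu_alt e 0).length : Int) := by
    rw [← List.length_map (f := pvIntOf), loopA_eq e hpre []]
    simp
  rw [hlen, ← alt_pad e hpre n]
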